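-- pv_equiv track=rewrite | github.com/SRmohakal/LeetCode | 3912-valid-elements-in-an-array/3912-valid-elements-in-an-array.py | findValidElements
-- ===== SOURCE A (Python) =====
-- def findValidElements(nums: list[int]) -> list[int]:
--     n = len(nums)
--
--     if n == 1:
--         return nums
--
--     pre_max = [0] * n
--     pre_max[0] = nums[0]
--     for i in range(1, n):
--         pre_max[i] = max(pre_max[i-1], nums[i])
--
--     suf_max = [0] * n
--     suf_max[n-1] = nums[n-1]
--     for i in range(n-2, -1, -1):
--         suf_max[i] = max(suf_max[i+1], nums[i])
--
--     result = []
--     for i in range(n):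
--         if i == 0 or i == n-1:
--             result.append(nums[i])
--         else:
--             if nums[i] > pre_max[i-1] or nums[i] > suf_max[i+1]:
--                 result.append(nums[i])
--
--     return result
-- ===== SOURCE B (Python) =====
-- def findValidElements(nums: list[int]) -> list[int]:
--     # keep x when every element to its left, or every element to its right, is smaller;
--     # an empty side is vacuously smaller, so endpoints (and a singleton) are always kept
--     return [x for i, x in enumerate(nums)
--             if all(y < x for y in nums[:i]) or all(y < x for y in nums[i+1:])]
-- ===== Notes on version B (the rewrite author's own statement) =====
-- stated objective: simpler
-- what changed: Drops A's two precomputed running-max arrays and three index loops entirely and instead tests the defining property directly per element (all left neighbours smaller, or all right neighbours smaller) in one comprehension; no maxima are maintained at all, at the cost of a quadratic scan.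
import Mathlib
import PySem

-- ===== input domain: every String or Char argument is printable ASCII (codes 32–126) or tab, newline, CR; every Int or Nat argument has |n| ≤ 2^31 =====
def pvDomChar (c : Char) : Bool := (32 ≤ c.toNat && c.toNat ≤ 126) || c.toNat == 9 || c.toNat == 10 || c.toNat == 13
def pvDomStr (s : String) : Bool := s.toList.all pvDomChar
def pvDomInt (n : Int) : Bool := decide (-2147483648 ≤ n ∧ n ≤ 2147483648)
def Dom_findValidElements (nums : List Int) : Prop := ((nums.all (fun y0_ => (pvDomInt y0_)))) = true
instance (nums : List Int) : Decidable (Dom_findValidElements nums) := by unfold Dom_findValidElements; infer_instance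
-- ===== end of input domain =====

-- B drops A's two running-max arrays and their three index loops and instead tests the
-- defining property of each element directly (all left neighbours smaller, or all right
-- neighbours smaller) in one comprehension (objective: simpler; quadratic instead of linear).

-- ===== PORT A =====
def findValidElements (nums : List Int) : List Int :=
  match nums with
  | [] => []   -- Python raises IndexError on []; excluded by Pre_
  | a :: _ =>
    let n := nums.length
    if n = 1 then nums else
    -- pre_max[0] = nums[0]; for i in range(1,n): pre_max[i] = max(pre_max[i-1], nums[i])
    let preMax := (List.range' 1 (n-1)).foldl
      (fun p i => p ++ [max (p.getD (i-1) 0) (nums.getD i 0)]) [a]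
    -- suf_max[n-1] = nums[n-1]; for i in range(n-2,-1,-1): suf_max[i] = max(suf_max[i+1], nums[i])
    let sufMax := ((List.range (n-1)).reverse).foldl
      (fun s i => (max (s.getD 0 0) (nums.getD i 0)) :: s) [nums.getD (n-1) 0]
    (List.range n).foldl (fun r i =>
      if i = 0 ∨ i = n-1 then r ++ [nums.getD i 0]
      else if preMax.getD (i-1) 0 < nums.getD i 0 ∨ sufMax.getD (i+1) 0 < nums.getD i 0
        then r ++ [nums.getD i 0] else r) []

-- ===== PORT B =====
-- [x for i, x in enumerate(nums) if all(y < x for y in nums[:i]) or all(y < x for y in nums[i+1:])]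
def findValidElements_alt (nums : List Int) : List Int :=
  (PySem.List.enumerate nums 0).filterMap (fun p =>
    if (PySem.List.slice nums none (some p.1)).all (fun y => y < p.2)
       || (PySem.List.slice nums (some (p.1 + 1)) none).all (fun y => y < p.2)
    then some p.2 else none)

-- ===== PRECONDITION & SPEC =====
-- Pre_ excludes only the empty list, on which Python A raises IndexError (pre_max[0] = nums[0]).
def Pre_findValidElements (nums : List Int) : Prop := nums ≠ []
instance (nums : List Int) : Decidable (Pre_findValidElements nums) := by unfold Pre_findValidElements; infer_instance
def pvWitness_findValidElements : List Int := [3, 1, 4, 1, 5]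

def Spec_findValidElements (nums : List Int) (out : List Int) : Prop := out = findValidElements_alt nums
instance (nums : List Int) (out : List Int) : Decidable (Spec_findValidElements nums out) := by unfold Spec_findValidElements; infer_instance

-- ===== CLAIM (what is proved, stated in full; the proofs are below) =====
def Claim_equal_findValidElements : Prop := ∀ (nums : List Int), Dom_findValidElements nums → Pre_findValidElements nums → Spec_findValidElements nums (findValidElements nums)

-- ===== LEMMAS AND PROOFS =====

-- max folds commute with shifting the seed
theorem fv_foldl_max_assoc (l : List Int) (a b : Int) :
    max a (l.foldl max b) = l.foldl max (max a b) := by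
  induction l generalizing b with
  | nil => rfl
  | cons x xs ih => simpa [List.foldl_cons, max_assoc] using ih (max b x)

-- a max fold is below x iff the seed and every element are
theorem fv_foldl_max_lt (l : List Int) (b x : Int) :
    (l.foldl max b < x) ↔ (b < x ∧ ∀ y ∈ l, y < x) := by
  induction l generalizing b with
  | nil => simp
  | cons c cs ih =>
    rw [List.foldl_cons, ih]
    constructor
    · rintro ⟨h1, h2⟩
      refine ⟨lt_of_le_of_lt (le_max_left _ _) h1, ?_⟩
      intro y hy
      rcases List.mem_cons.mp hy with rfl | hy'
      · exact lt_of_le_of_lt (le_max_right _ _) h1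
      · exact h2 y hy'
    · rintro ⟨h1, h2⟩
      exact ⟨max_lt h1 (h2 c (by simp)), fun y hy => h2 y (List.mem_cons_of_mem _ hy)⟩

-- prefix-maxima list: pmL m xs = [m, max m x0, max m x0 x1, …]
def pmL (m : Int) : List Int → List Int
  | [] => [m]
  | x :: xs => m :: pmL (max m x) xs

theorem pmL_getD (m : Int) (xs : List Int) :
    ∀ i, i ≤ xs.length → (pmL m xs).getD i 0 = (xs.take i).foldl max m := by
  induction xs generalizing m with
  | nil => intro i hi; simp at hi; subst hi; rfl
  | cons x xs ih =>
    intro i hi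
    cases i with
    | zero => rfl
    | succ j => simpa [pmL] using ih (max m x) j (by simpa using hi)

theorem pmL_append (m : Int) (ys : List Int) (y : Int) :
    pmL m (ys ++ [y]) = pmL m ys ++ [max (ys.foldl max m) y] := by
  induction ys generalizing m with
  | nil => rfl
  | cons c cs ih => simp [pmL, ih (max m c)]

theorem fv_pre_fold (a : Int) (rest : List Int) :
    ∀ k, k ≤ rest.length →
      (List.range' 1 k).foldl
        (fun p i => p ++ [max (p.getD (i-1) 0) ((a :: rest).getD i 0)]) [a]
      = pmL a (rest.take k) := by
  intro k hk
  induction k with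
  | zero => rfl
  | succ j ih =>
    have hj : j ≤ rest.length := Nat.le_of_succ_le hk
    have hjlt : j < rest.length := hk
    rw [List.range'_concat, List.foldl_append, ih hj]
    have h1 : (pmL a (rest.take j)).getD ((1 + j) - 1) 0 = (rest.take j).foldl max a := by
      have := pmL_getD a (rest.take j) j (by simp [hj])
      simpa [Nat.add_comm 1 j, List.take_take] using this
    have h2 : (a :: rest).getD (1 + j) 0 = rest.getD j 0 := by
      cases h : 1 + j with
      | zero => omega
      | succ t => have : t = j := by omega
                  simp [this]
    have h3 : rest.take (j+1) = rest.take j ++ [rest.getD j 0] := by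
      rw [List.take_add_one]
      congr 1
      simp [List.getD_eq_getElem?_getD, List.getElem?_eq_getElem hjlt]
    simp only [Nat.one_mul, List.foldl_cons, List.foldl_nil, h1, h2, h3, pmL_append]

-- suffix-maxima list: smL xs has entry i = max of xs[i:]
def smL : List Int → List Int
  | [] => []
  | x :: xs => max x ((smL xs).headD x) :: smL xs

theorem smL_head (x : Int) (xs : List Int) :
    max x ((smL xs).headD x) = xs.foldl max x := by
  induction xs generalizing x with
  | nil => simp [smL]
  | cons y ys ih =>
    have : (smL (y :: ys)).headD x = max y ((smL ys).headD y) := by simp [smL]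
    rw [this, ih y, fv_foldl_max_assoc, List.foldl_cons]

theorem smL_getD (xs : List Int) :
    ∀ i, i < xs.length → (smL xs).getD i 0 = (xs.drop (i+1)).foldl max (xs.getD i 0) := by
  induction xs with
  | nil => intro i hi; simp at hi
  | cons x xs ih =>
    intro i hi
    cases i with
    | zero => simpa [smL] using smL_head x xs
    | succ j => simpa [smL] using ih j (by simpa using hi)

theorem fv_suf_step (nums : List Int) (k : Nat) (hk : k + 1 < nums.length) :
    (max ((smL (nums.drop (k+1))).getD 0 0) (nums.getD k 0)) :: smL (nums.drop (k+1))
      = smL (nums.drop k) := by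
  have hklt : k < nums.length := by omega
  have hdrop : nums.drop k = nums.getD k 0 :: nums.drop (k+1) := by
    rw [List.getD_eq_getElem (hn := hklt)]
    exact List.drop_eq_getElem_cons hklt
  obtain ⟨c, cs, hcs⟩ : ∃ c cs, nums.drop (k+1) = c :: cs := by
    cases h : nums.drop (k+1) with
    | nil => exfalso; have := List.drop_eq_nil_iff.mp h; omega
    | cons c cs => exact ⟨c, cs, rfl⟩
  have hh : (smL (c :: cs)).getD 0 0 = max c ((smL cs).headD c) := by simp [smL]
  have hh2 : ∀ d : Int, (smL (c :: cs)).headD d = max c ((smL cs).headD c) := by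
    intro d; simp [smL]
  rw [hdrop, hcs]
  show _ = max (nums.getD k 0) ((smL (c :: cs)).headD (nums.getD k 0)) :: smL (c :: cs)
  rw [hh, hh2, max_comm]

theorem fv_suf_fold (nums : List Int) (hn : nums ≠ []) :
    ∀ k, k ≤ nums.length - 1 →
      (List.range k).foldr
        (fun i s => (max (s.getD 0 0) (nums.getD i 0)) :: s) (smL (nums.drop k))
      = smL nums := by
  intro k hk
  induction k with
  | zero => simp
  | succ j ih =>
    have hj : j ≤ nums.length - 1 := Nat.le_of_succ_le hk
    have hjlt : j + 1 < nums.length := by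
      have : nums.length ≠ 0 := by simpa using hn
      omega
    rw [List.range_succ, List.foldr_append]
    simp only [List.foldr_cons, List.foldr_nil]
    rw [fv_suf_step nums j hjlt, ih hj]

-- enumerate as a map over the index range
theorem fv_enumerate_eq_map (xs : List Int) :
    ∀ s : Int, PySem.List.enumerate xs s
      = (List.range xs.length).map (fun (j : Nat) => (s + (j : Int), xs.getD j 0)) := by
  induction xs with
  | nil => intro s; simp [PySem.List.enumerate_nil]
  | cons x xs ih =>
    intro s
    rw [PySem.List.enumerate_cons, ih (s + 1), List.length_cons, List.range_succ_eq_map,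
      List.map_cons, List.map_map]
    refine congrArg₂ List.cons (by simp) (List.map_congr_left ?_)
    intro j _
    refine Prod.ext ?_ ?_
    · show s + 1 + (j : Int) = s + ((j : Nat) + 1 : Nat)
      push_cast; ring
    · show xs.getD j 0 = (x :: xs).getD (j + 1) 0
      simp

-- filterMap with an if-guard over a list of indices is filter-then-map
theorem fv_filterMap_if (l : List Nat) (q : Nat → Bool) (g : Nat → Int) :
    l.filterMap (fun j => if q j then some (g j) else none)
      = (l.filter q).map g := by
  induction l with
  | nil => rfl
  | cons c cs ih =>
    by_cases h : q c <;> simp [h, ih]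

-- ===== VERDICT (by name: the statement is the Claim_ definition above) =====
theorem findValidElements_spec : Claim_equal_findValidElements := by
  intro nums _ hpre
  unfold Spec_findValidElements
  -- reduce B to a filter/map over List.range
  have hB : findValidElements_alt nums
      = ((List.range nums.length).filter (fun j =>
            (nums.take j).all (fun y => y < nums.getD j 0)
            || (nums.drop (j+1)).all (fun y => y < nums.getD j 0))).map
          (fun (j : Nat) => nums.getD j 0) := by
    unfold findValidElements_alt
    rw [fv_enumerate_eq_map nums 0, List.filterMap_map]
    have hfun : ∀ j ∈ List.range nums.length,
        ((fun p : Int × Int =>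
            if (PySem.List.slice nums none (some p.1)).all (fun y => y < p.2)
               || (PySem.List.slice nums (some (p.1 + 1)) none).all (fun y => y < p.2)
            then some p.2 else none) ∘ (fun (j : Nat) => ((0 : Int) + (j : Int), nums.getD j 0))) j
        = (fun (j : Nat) => if (nums.take j).all (fun y => y < nums.getD j 0)
              || (nums.drop (j+1)).all (fun y => y < nums.getD j 0)
            then some (nums.getD j 0) else none) j := by
      intro j _
      have h1 : (0 : Int) + (j : Int) = ((j : Nat) : Int) := by omega
      have h2 : ((j : Nat) : Int) + 1 = (((j + 1 : Nat)) : Int) := by omega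
      simp only [Function.comp, h1, h2, PySem.List.slice_to_natCast,
        PySem.List.slice_from_natCast]
    rw [List.filterMap_congr hfun, fv_filterMap_if]
  rw [hB]
  clear hB
  cases nums with
  | nil => exact absurd rfl hpre
  | cons a rest =>
  cases rest with
  | nil => simp [findValidElements]
  | cons r0 rest' =>
    -- A's pre_max fold is the prefix-maxima list
    have hpre2 := fv_pre_fold a (r0 :: rest') (r0 :: rest').length (le_refl _)
    rw [List.take_length] at hpre2
    -- A's suf_max fold is the suffix-maxima list
    have hdroplast : (a :: r0 :: rest').drop (rest'.length + 1)
        = [(a :: r0 :: rest').getD (rest'.length + 1) 0] := by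
      have h1 : (a :: r0 :: rest').drop (rest'.length + 1)
          = (a :: r0 :: rest').getD (rest'.length + 1) 0 :: (a :: r0 :: rest').drop (rest'.length + 2) := by
        rw [List.getD_eq_getElem (hn := by simp)]
        exact List.drop_eq_getElem_cons (by simp)
      rw [h1]
      simp
    have hsuf := fv_suf_fold (a :: r0 :: rest') (by simp) (rest'.length + 1) (by simp)
    rw [hdroplast] at hsuf
    have hinit : smL [(a :: r0 :: rest').getD (rest'.length + 1) 0]
        = [(a :: r0 :: rest').getD (rest'.length + 1) 0] := by simp [smL]
    rw [hinit] at hsuf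
    simp only [List.length_cons] at hpre2 hsuf
    -- reduce A's port to a filter/map over the index range
    simp only [findValidElements, List.length_cons]
    rw [if_neg (by omega : ¬ rest'.length + 1 + 1 = 1)]
    simp only [Nat.add_sub_cancel]
    rw [hpre2]
    simp only [List.foldl_reverse]
    rw [hsuf]
    have hmerge : ∀ (r : List Int) (i : Nat),
        (if i = 0 ∨ i = rest'.length + 1 then r ++ [(a :: r0 :: rest').getD i 0]
         else if (pmL a (r0 :: rest')).getD (i - 1) 0 < (a :: r0 :: rest').getD i 0 ∨
                  (smL (a :: r0 :: rest')).getD (i + 1) 0 < (a :: r0 :: rest').getD i 0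
           then r ++ [(a :: r0 :: rest').getD i 0] else r)
        = if (i = 0 ∨ i = rest'.length + 1) ∨
              ((pmL a (r0 :: rest')).getD (i - 1) 0 < (a :: r0 :: rest').getD i 0 ∨
               (smL (a :: r0 :: rest')).getD (i + 1) 0 < (a :: r0 :: rest').getD i 0)
            then r ++ [(a :: r0 :: rest').getD i 0] else r := by
      intro r i
      by_cases h1 : i = 0 ∨ i = rest'.length + 1 <;> simp [h1]
    simp only [hmerge]
    rw [PySem.List.foldl_append_ite, List.nil_append]
    -- the two index predicates agree pointwise
    refine congrArg (List.map _) (List.filter_congr ?_)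
    intro i hmem
    set nums := a :: r0 :: rest' with hnums
    have hi2 : i < rest'.length + 2 := by
      have h := List.mem_range.mp hmem
      omega
    have hlen : nums.length = rest'.length + 2 := by simp [hnums]
    by_cases hi0 : i = 0
    · subst hi0; simp
    by_cases hie : i = rest'.length + 1
    · subst hie
      have hdropnil : nums.drop (rest'.length + 1 + 1) = [] := by
        apply List.drop_eq_nil_iff.mpr; omega
      simp [hdropnil]
    -- interior index
    have hi1 : 1 ≤ i := by omega
    have hP : (pmL a (r0 :: rest')).getD (i-1) 0 = ((r0 :: rest').take (i-1)).foldl max a :=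
      pmL_getD a (r0 :: rest') (i-1) (by simp; omega)
    have hS : (smL nums).getD (i+1) 0
        = (nums.drop (i+2)).foldl max (nums.getD (i+1) 0) :=
      smL_getD nums (i+1) (by omega)
    have htake : nums.take i = a :: (r0 :: rest').take (i-1) := by
      rw [hnums]
      cases i with
      | zero => omega
      | succ j => simp
    have hdrop1 : nums.drop (i+1) = nums.getD (i+1) 0 :: nums.drop (i+2) := by
      rw [List.getD_eq_getElem (hn := by omega)]
      exact List.drop_eq_getElem_cons (by omega)
    rw [hP, hS]
    have hA : (((r0 :: rest').take (i-1)).foldl max a < nums.getD i 0)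
        ↔ (nums.take i).all (fun y => y < nums.getD i 0) = true := by
      rw [fv_foldl_max_lt, htake, List.all_cons]
      simp [List.all_eq_true]
    have hB2 : ((nums.drop (i+2)).foldl max (nums.getD (i+1) 0) < nums.getD i 0)
        ↔ (nums.drop (i+1)).all (fun y => y < nums.getD i 0) = true := by
      rw [fv_foldl_max_lt, hdrop1, List.all_cons]
      simp [List.all_eq_true]
    simp only [hi0, hie, false_or, or_false]
    rw [Bool.eq_iff_iff]
    simp only [Bool.or_eq_true, decide_eq_true_iff]
    exact or_congr hA hB2
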